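-- pv_equiv track=rewrite | github.com/mhirimohamed/HWS_-space_of_difference_between_representations | representations.py | rep_EX
-- ===== SOURCE A (Python) =====
-- def rep_EX(w, alpha):
--
--     T=[]
--
--     for c1 in alpha:
--         test=0
--         for c2 in w:
--             if c1==c2:
--                 test=1
--
--         if test==1:
--             T=T+[1]
--         else:
--             T=T+[0]
--
--     return T
-- ===== SOURCE B (Python) =====
-- def rep_EX(w, alpha):
--     T = [0] * len(alpha)
--     pos = {}
--     for i, c in enumerate(alpha):
--         pos[c] = pos.get(c, []) + [i]
--     for c in w:
--         if c in pos:
--             for i in pos[c]: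
--                 T[i] = 1
--     return T
-- ===== Notes on version B (the rewrite author's own statement) =====
-- stated objective: faster
-- what changed: Instead of rescanning all of w for every character of alpha, B builds a dict mapping each alpha character to all its indices in one pass over alpha and then makes a single pass over w, marking the stored indices in a preallocated 0/1 array.
import Mathlib
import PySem

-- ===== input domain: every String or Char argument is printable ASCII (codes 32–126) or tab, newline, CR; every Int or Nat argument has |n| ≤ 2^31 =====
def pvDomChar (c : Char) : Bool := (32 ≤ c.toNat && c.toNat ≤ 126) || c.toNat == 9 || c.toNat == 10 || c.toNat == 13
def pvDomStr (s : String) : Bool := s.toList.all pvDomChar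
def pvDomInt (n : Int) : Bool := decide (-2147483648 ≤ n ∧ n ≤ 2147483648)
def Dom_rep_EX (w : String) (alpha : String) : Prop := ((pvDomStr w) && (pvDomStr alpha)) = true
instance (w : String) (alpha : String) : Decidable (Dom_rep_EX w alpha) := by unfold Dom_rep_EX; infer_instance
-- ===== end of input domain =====

-- B replaces A's rescan of w for every alpha char by one index of alpha's positions and a single pass over w (alternative decomposition).

-- ===== PORT A =====
-- literal port: for each c1 in alpha, scan all of w setting test, then append 1 or 0
def rep_EX (w : String) (alpha : String) : List Int :=
  alpha.toList.foldl (fun T c1 =>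
    let test : Int := w.toList.foldl (fun test c2 => if c1 = c2 then 1 else test) 0
    if test = 1 then T ++ [(1 : Int)] else T ++ [(0 : Int)]) []

-- ===== PORT B =====
-- literal port of Source B: T = [0]*len(alpha); pos maps each char of alpha to all its indices; one pass over w
def rep_EX_alt (w : String) (alpha : String) : List Int :=
  let T0 : List Int := List.replicate alpha.toList.length 0
  let pos : PySem.Dict Char (List Int) :=
    (PySem.List.enumerate alpha.toList).foldl
      (fun d p => d.modify p.2 [] (fun v => v ++ [p.1])) PySem.Dict.empty
  w.toList.foldl (fun T c =>
    if pos.contains c then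
      (pos.getD c []).foldl (fun T i => PySem.List.pySetD T i 1) T
    else T) T0

-- ===== PRECONDITION & SPEC =====
def Spec_rep_EX (w : String) (alpha : String) (out : List Int) : Prop := out = rep_EX_alt w alpha
instance (w : String) (alpha : String) (out : List Int) : Decidable (Spec_rep_EX w alpha out) := by unfold Spec_rep_EX; infer_instance

-- ===== CLAIM (what is proved, stated in full; the proofs are below) =====
def Claim_equal_rep_EX : Prop := ∀ (w : String) (alpha : String), Dom_rep_EX w alpha → Spec_rep_EX w alpha (rep_EX w alpha)

-- ===== LEMMAS AND PROOFS =====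

-- the common value both programs compute
def pvMark (w : String) (alpha : String) : List Int :=
  alpha.toList.map (fun c => if c ∈ w.toList then (1 : Int) else 0)

-- ---- A side ----
theorem pv_inner (c1 : Char) (l : List Char) (init : Int) :
    l.foldl (fun t c2 => if c1 = c2 then 1 else t) init = if c1 ∈ l then 1 else init := by
  induction l generalizing init with
  | nil => simp
  | cons x xs ih =>
    simp only [List.foldl_cons, ih, List.mem_cons]
    by_cases h : c1 = x <;> simp [h]

theorem pv_A_eq (w alpha : String) : rep_EX w alpha = pvMark w alpha := by
  unfold rep_EX pvMark
  suffices h : ∀ (l : List Char) (acc : List Int),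
      l.foldl (fun T c1 =>
        let test : Int := w.toList.foldl (fun test c2 => if c1 = c2 then 1 else test) 0
        if test = 1 then T ++ [(1 : Int)] else T ++ [(0 : Int)]) acc
      = acc ++ l.map (fun c => if c ∈ w.toList then (1 : Int) else 0) by
    simpa using h alpha.toList []
  intro l
  induction l with
  | nil => simp
  | cons x xs ih =>
    intro acc
    rw [List.foldl_cons, ih]
    by_cases h : x ∈ w.toList <;> simp [pv_inner, h]

-- ---- B side ----
-- the position dictionary of alpha
def pvPos (n : List Char) : PySem.Dict Char (List Int) :=
  (PySem.List.enumerate n).foldl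
    (fun d p => d.modify p.2 [] (fun v => v ++ [p.1])) PySem.Dict.empty

theorem pv_contains (n : List Char) (c : Char) :
    (pvPos n).contains c = true ↔ c ∈ n := by
  rw [PySem.Dict.contains_iff_mem_keys]
  unfold pvPos
  rw [PySem.Dict.keys_foldl_modify_key (PySem.List.enumerate n) Prod.snd []
      (fun d p => (fun v => v ++ [p.1])) PySem.Dict.empty]
  rw [PySem.Dict.keys_empty]
  have hmap : List.map Prod.snd (PySem.List.enumerate n) = n := PySem.List.map_snd_enumerate n 0
  rw [hmap]
  have := PySem.Set.mem_update (PySem.Set.ofList ([] : List Char)) n c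
  simpa [PySem.Set.ofList] using this

-- the index list stored for character c
def pvIdxs (n : List Char) (c : Char) : List Int :=
  List.map (fun x => x.2)
    (List.filter (fun p => p.1 == c) ((PySem.List.enumerate n).map Prod.swap))

theorem pv_getD (n : List Char) (c : Char) :
    (pvPos n).getD c [] = pvIdxs n c := by
  unfold pvPos pvIdxs
  rw [show ((PySem.List.enumerate n).foldl
        (fun d p => d.modify p.2 [] (fun v => v ++ [p.1])) PySem.Dict.empty)
      = (((PySem.List.enumerate n).map Prod.swap).foldl
        (fun d p => d.modify p.1 [] (fun v => v ++ [p.2])) PySem.Dict.empty) by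
      rw [List.foldl_map]; rfl]
  rw [PySem.Dict.getD_foldl_modify_append]
  simp

theorem pv_mem_idxs (n : List Char) (c : Char) (i : Int) :
    i ∈ pvIdxs n c ↔ ∃ (k : Nat) (h : k < n.length), i = (k : Int) ∧ n[k] = c := by
  unfold pvIdxs
  simp only [List.mem_map, List.mem_filter, List.mem_map, PySem.List.mem_enumerate_iff,
    beq_iff_eq]
  constructor
  · rintro ⟨p, ⟨⟨a, ⟨⟨k, hk, rfl⟩, rfl⟩⟩, hpc⟩, rfl⟩
    simp only [Prod.swap_prod_mk] at hpc ⊢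
    exact ⟨k, hk, by simp, hpc⟩
  · rintro ⟨k, hk, rfl, hc⟩
    exact ⟨((0 : Int) + (k : Int), n[k]).swap, ⟨⟨((0 : Int) + (k : Int), n[k]), ⟨⟨k, hk, rfl⟩, rfl⟩⟩, hc⟩, by simp⟩

theorem pv_set_fold (l : List Int) :
    ∀ (T : List Int), (∀ i ∈ l, ∃ k : Nat, i = (k : Int) ∧ k < T.length) →
      (l.foldl (fun T i => PySem.List.pySetD T i 1) T).length = T.length ∧
      ∀ m : Nat, PySem.List.pyGetD (l.foldl (fun T i => PySem.List.pySetD T i 1) T) (m : Int) 0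
        = if (m : Int) ∈ l then 1 else PySem.List.pyGetD T (m : Int) 0 := by
  induction l with
  | nil => intro T _; simp
  | cons i rest ih =>
    intro T hb
    obtain ⟨k, rfl, hk⟩ := hb i (by simp)
    have hb' : ∀ j ∈ rest, ∃ k' : Nat, j = (k' : Int) ∧ k' < (PySem.List.pySetD T (k : Int) 1).length := by
      intro j hj
      obtain ⟨k', rfl, hk'⟩ := hb j (by simp [hj])
      exact ⟨k', rfl, by rwa [PySem.List.length_pySetD]⟩
    obtain ⟨hlen, hget⟩ := ih (PySem.List.pySetD T (k : Int) 1) hb'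
    refine ⟨by rw [List.foldl_cons, hlen, PySem.List.length_pySetD], ?_⟩
    intro m
    rw [List.foldl_cons, hget m, PySem.List.pyGetD_pySetD_natCast T k m 1 0 hk]
    by_cases hmr : (m : Int) ∈ rest
    · simp [hmr]
    · by_cases hmk : m = k
      · simp [hmk]
      · have : ((m : Int) = (k : Int)) = False := by simp [hmk]
        simp [hmr, hmk, this]

theorem pv_step (n : List Char) (c : Char) (T : List Int) (hT : T.length = n.length) :
    ((if (pvPos n).contains c then
        ((pvPos n).getD c []).foldl (fun T i => PySem.List.pySetD T i 1) T
      else T).length = T.length) ∧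
    ∀ m : Nat, (hm : m < n.length) →
      PySem.List.pyGetD (if (pvPos n).contains c then
          ((pvPos n).getD c []).foldl (fun T i => PySem.List.pySetD T i 1) T
        else T) (m : Int) 0
      = if n[m] = c then 1 else PySem.List.pyGetD T (m : Int) 0 := by
  by_cases hc : (pvPos n).contains c = true
  · rw [if_pos hc, pv_getD]
    have hb : ∀ i ∈ pvIdxs n c, ∃ k : Nat, i = (k : Int) ∧ k < T.length := by
      intro i hi
      obtain ⟨k, hk, rfl, _⟩ := (pv_mem_idxs n c i).1 hi
      exact ⟨k, rfl, by omega⟩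
    obtain ⟨hlen, hget⟩ := pv_set_fold (pvIdxs n c) T hb
    refine ⟨hlen, ?_⟩
    intro m hm
    rw [hget m]
    have hmem : ((m : Int) ∈ pvIdxs n c) ↔ n[m] = c := by
      rw [pv_mem_idxs]
      constructor
      · rintro ⟨k, hk, heq, hck⟩
        have : m = k := by exact_mod_cast heq
        subst this; exact hck
      · intro h; exact ⟨m, by omega, rfl, h⟩
    by_cases h : n[m] = c
    · simp [hmem.2 h, h]
    · have : ¬ ((m : Int) ∈ pvIdxs n c) := fun hx => h (hmem.1 hx)
      simp [this, h]
  · rw [if_neg hc]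
    refine ⟨rfl, ?_⟩
    intro m hm
    have hcn : c ∉ n := fun h => hc ((pv_contains n c).2 h)
    have : n[m] ≠ c := by
      intro h; exact hcn (h ▸ List.getElem_mem _)
    simp [this]

theorem pv_w_fold (n : List Char) (v : List Char) :
    ∀ (T : List Int), T.length = n.length →
      ((v.foldl (fun T c =>
          if (pvPos n).contains c then
            ((pvPos n).getD c []).foldl (fun T i => PySem.List.pySetD T i 1) T
          else T) T).length = n.length) ∧
      ∀ m : Nat, (hm : m < n.length) →
        PySem.List.pyGetD (v.foldl (fun T c =>
            if (pvPos n).contains c then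
              ((pvPos n).getD c []).foldl (fun T i => PySem.List.pySetD T i 1) T
            else T) T) (m : Int) 0
        = if n[m] ∈ v then 1 else PySem.List.pyGetD T (m : Int) 0 := by
  induction v with
  | nil => intro T hT; refine ⟨hT, ?_⟩; intro m hm; simp
  | cons c cs ih =>
    intro T hT
    obtain ⟨hlen1, hget1⟩ := pv_step n c T hT
    obtain ⟨hlen2, hget2⟩ := ih _ (by rw [hlen1, hT])
    refine ⟨by simpa using hlen2, ?_⟩
    intro m hm
    rw [List.foldl_cons, hget2 m hm, hget1 m hm]
    by_cases h1 : n[m] ∈ cs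
    · simp [h1]
    · by_cases h2 : n[m] = c <;> simp [h1, h2]

theorem pv_B_eq (w alpha : String) : rep_EX_alt w alpha = pvMark w alpha := by
  unfold rep_EX_alt
  show (w.toList.foldl (fun T c =>
      if (pvPos alpha.toList).contains c then
        ((pvPos alpha.toList).getD c []).foldl (fun T i => PySem.List.pySetD T i 1) T
      else T) (List.replicate alpha.toList.length 0)) = pvMark w alpha
  obtain ⟨hlen, hget⟩ := pv_w_fold alpha.toList w.toList
      (List.replicate alpha.toList.length 0) (by simp)
  apply List.ext_getElem
  · rw [hlen]; simp [pvMark]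
  · intro m hm1 hm2
    have hmn : m < alpha.toList.length := by rwa [hlen] at hm1
    have h0 : PySem.List.pyGetD (List.replicate alpha.toList.length (0 : Int)) (m : Int) 0 = 0 := by
      simp [PySem.List.pyGetD_natCast, List.getD]
    have hg := hget m hmn
    rw [h0] at hg
    have hge : PySem.List.pyGetD (w.toList.foldl (fun T c =>
        if (pvPos alpha.toList).contains c then
          ((pvPos alpha.toList).getD c []).foldl (fun T i => PySem.List.pySetD T i 1) T
        else T) (List.replicate alpha.toList.length 0)) (m : Int) 0
        = (w.toList.foldl (fun T c =>
        if (pvPos alpha.toList).contains c then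
          ((pvPos alpha.toList).getD c []).foldl (fun T i => PySem.List.pySetD T i 1) T
        else T) (List.replicate alpha.toList.length 0))[m]'hm1 := by
      rw [PySem.List.pyGetD_natCast]
      exact List.getD_eq_getElem _ _ hm1
    rw [hge] at hg
    rw [hg]
    simp [pvMark]

-- ===== VERDICT (by name: the statement is the Claim_ definition above) =====
theorem rep_EX_spec : Claim_equal_rep_EX := by
  intro w alpha _
  unfold Spec_rep_EX
  rw [pv_A_eq, pv_B_eq]
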